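-- pv_equiv track=rewrite | github.com/carey-bunks/Jazz-Chord-Progressions-Corpus | Code_Contrafact_Experiment/ChordProgUtils.py | convert2progression
-- ===== SOURCE A (Python) =====
-- def convert2progression(timesig, data):
--     """Convert the tuple (chords, beats) into a progression
--
--     """
--
--     # Remove the <START> and <END> tags from the chords and the zeros from the beats
--     c = data[0][1:-1]
--     b = data[1][1:-1]
--
--     bnum = timesig[0]
--     btype = timesig[1]
--
--     cnt = 0
--     progression = []
--     for k,b in enumerate(b):
--         cnt += b
--         progression.append(c[k])
--         if cnt%bnum == 0:
--             progression.append('|')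
--
--     if progression[-1] == '|':
--         progression.pop()
--
--     return progression
-- ===== SOURCE B (Python) =====
-- def convert2progression(timesig, data):
--     """Convert the tuple (chords, beats) into a progression
--
--     Grouping re-implementation: chords are collected bar by bar, and the
--     bars are then joined with '|' separators.
--     """
--     chords = data[0][1:-1]
--     beats = data[1][1:-1]
--     bnum = timesig[0]
--
--     bars = []
--     current = []
--     total = 0
--     for chord, beat in zip(chords, beats):
--         total += beat
--         current.append(chord)
--         if total % bnum == 0:
--             bars.append(current)
--             current = []
--     if current:
--         bars.append(current)
--
--     progression = bars[0]
--     for bar in bars[1:]: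
--         progression.append('|')
--         progression.extend(bar)
--     return progression
-- ===== Notes on version B (the rewrite author's own statement) =====
-- stated objective: alternative
-- what changed: B groups the trimmed chords into bars (closing a bar whenever the running beat total is a multiple of bnum) and then joins the bars with '|' separators, instead of A's flat append-a-separator-then-pop-the-trailing-one loop.
-- intended difference: When the last chord consumed is literally the string '|' and the final bar does not close (running total not a multiple of bnum), A's trailing-'|' pop deletes that chord from the output while B keeps it; keeping the chord is the intended value since the pop was only meant to remove the separator A itself appended. — e.g. on convert2progression((4, 4), (["<s>", "C", "|", "<e>"], [0, 1, 1, 0])): A returns ["C"], B returns ["C", "|"]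
import Mathlib
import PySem

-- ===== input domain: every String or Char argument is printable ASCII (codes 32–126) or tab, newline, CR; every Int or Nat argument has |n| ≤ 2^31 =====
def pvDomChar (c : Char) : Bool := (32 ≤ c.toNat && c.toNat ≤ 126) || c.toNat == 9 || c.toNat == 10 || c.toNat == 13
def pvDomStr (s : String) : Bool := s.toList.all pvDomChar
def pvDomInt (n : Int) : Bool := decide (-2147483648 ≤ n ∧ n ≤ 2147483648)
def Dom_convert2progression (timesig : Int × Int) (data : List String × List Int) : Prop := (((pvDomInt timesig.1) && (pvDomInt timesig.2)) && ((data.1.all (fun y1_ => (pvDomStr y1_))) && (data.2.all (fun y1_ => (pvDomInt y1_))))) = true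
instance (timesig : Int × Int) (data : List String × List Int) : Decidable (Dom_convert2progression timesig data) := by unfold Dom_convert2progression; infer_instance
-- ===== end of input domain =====

-- B replaces A's flat append-separator-then-pop loop by grouping chords into bars and joining
-- the bars with '|' separators (alternative decomposition, same cost); return values only are compared.


-- ===== PORT A =====
-- 'for k,b in enumerate(b): cnt += b; progression.append(c[k]); if cnt%bnum==0: progression.append("|")'
def pvLoopA (c : List String) (bnum : Int) : List Int → Int → Int → List String → Int × List String
  | [], _, cnt, prog => (cnt, prog)
  | b :: bs, k, cnt, prog =>
      let cnt' := cnt + b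
      let prog' := prog ++ [(PySem.List.pyGet? c k).getD ""]   -- c[k]; none (IndexError) is outside Pre_
      pvLoopA c bnum bs (k + 1) cnt'
        (if PySem.Int.mod cnt' bnum == 0 then prog' ++ ["|"] else prog')

def convert2progression (timesig : Int × Int) (data : List String × List Int) : List String :=
  let c := PySem.List.slice data.1 (some 1) (some (-1))
  let b := PySem.List.slice data.2 (some 1) (some (-1))
  let bnum := timesig.1
  let progression := (pvLoopA c bnum b 0 0 []).2
  -- 'if progression[-1] == "|": progression.pop()' (empty progression raises IndexError: outside Pre_)
  if PySem.List.pyGet? progression (-1) == some "|" then progression.dropLast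
  else progression

-- ===== PORT B =====
-- 'for chord, beat in zip(chords, beats): total += beat; current.append(chord); if total%bnum==0: close bar'
def pvLoopB (bnum : Int) : List (String × Int) → List (List String) → List String → Int → List (List String) × List String
  | [], bars, cur, _ => (bars, cur)
  | (ch, be) :: rest, bars, cur, total =>
      let total' := total + be
      let cur' := cur ++ [ch]
      if PySem.Int.mod total' bnum == 0 then pvLoopB bnum rest (bars ++ [cur']) [] total'
      else pvLoopB bnum rest bars cur' total'

def convert2progression_alt (timesig : Int × Int) (data : List String × List Int) : List String :=
  let chords := PySem.List.slice data.1 (some 1) (some (-1))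
  let beats := PySem.List.slice data.2 (some 1) (some (-1))
  let bnum := timesig.1
  let st := pvLoopB bnum (chords.zip beats) [] [] 0
  let bars := if st.2 = [] then st.1 else st.1 ++ [st.2]      -- 'if current: bars.append(current)'
  -- 'progression = bars[0]; for bar in bars[1:]: progression.append("|"); progression.extend(bar)'
  match bars with
  | [] => []                                                   -- Python raises IndexError (bars[0]) here; outside Pre_
  | bar0 :: rest => rest.foldl (fun out bar => out ++ ["|"] ++ bar) bar0

-- ===== PRECONDITION & SPEC =====
-- Pre_ excludes exactly the inputs where A raises: bnum = 0 (ZeroDivisionError), empty trimmed beats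
-- (progression[-1] IndexError), and trimmed chords shorter than trimmed beats (c[k] IndexError).
def Pre_convert2progression (timesig : Int × Int) (data : List String × List Int) : Prop :=
  timesig.1 ≠ 0 ∧
  PySem.List.slice data.2 (some 1) (some (-1)) ≠ ([] : List Int) ∧
  (PySem.List.slice data.2 (some 1) (some (-1))).length ≤ (PySem.List.slice data.1 (some 1) (some (-1))).length
instance (timesig : Int × Int) (data : List String × List Int) : Decidable (Pre_convert2progression timesig data) := by unfold Pre_convert2progression; infer_instance
def pvWitness_convert2progression : (Int × Int) × (List String × List Int) :=
  ((4, 4), (["<s>", "C", "Dm7", "<e>"], [0, 2, 2, 0]))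

-- When the last trimmed chord consumed is literally "|" and the final bar does not close (running beat
-- total not a multiple of bnum), A's trailing-'|' pop deletes that chord while B keeps it; keeping the
-- chord is intended, since the pop was only meant to remove the separator A itself appended.
def D_convert2progression (timesig : Int × Int) (data : List String × List Int) : Prop :=
  data.2.tail.dropLast ≠ ([] : List Int) ∧
  data.2.tail.dropLast.length ≤ data.1.tail.dropLast.length ∧
  ¬ (timesig.1 ∣ data.2.tail.dropLast.sum) ∧
  getElem? data.1.tail.dropLast (data.2.tail.dropLast.length - 1) = some "|"
instance (timesig : Int × Int) (data : List String × List Int) : Decidable (D_convert2progression timesig data) := by unfold D_convert2progression; infer_instance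

def Spec_convert2progression (timesig : Int × Int) (data : List String × List Int) (out : List String) : Prop := ¬ D_convert2progression timesig data → out = convert2progression_alt timesig data
instance (timesig : Int × Int) (data : List String × List Int) (out : List String) : Decidable (Spec_convert2progression timesig data out) := by unfold Spec_convert2progression; infer_instance

def pvDiffWitness_convert2progression : (Int × Int) × (List String × List Int) :=
  ((4, 4), (["<s>", "C", "|", "<e>"], [0, 1, 1, 0]))
def pvDiffWitnessOut_convert2progression : (List String) × (List String) := (["C"], ["C", "|"])


-- ===== CLAIM (what is proved, stated in full; the proofs are below) =====
def Claim_unchanged_convert2progression : Prop := ∀ (timesig : Int × Int) (data : List String × List Int), Dom_convert2progression timesig data → Pre_convert2progression timesig data → Spec_convert2progression timesig data (convert2progression timesig data)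
def Claim_changed_convert2progression : Prop := Dom_convert2progression (pvDiffWitness_convert2progression.1) (pvDiffWitness_convert2progression.2) ∧ Pre_convert2progression (pvDiffWitness_convert2progression.1) (pvDiffWitness_convert2progression.2) ∧ D_convert2progression (pvDiffWitness_convert2progression.1) (pvDiffWitness_convert2progression.2) ∧ convert2progression (pvDiffWitness_convert2progression.1) (pvDiffWitness_convert2progression.2) = pvDiffWitnessOut_convert2progression.1 ∧ convert2progression_alt (pvDiffWitness_convert2progression.1) (pvDiffWitness_convert2progression.2) = pvDiffWitnessOut_convert2progression.2 ∧ pvDiffWitnessOut_convert2progression.1 ≠ pvDiffWitnessOut_convert2progression.2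
def Claim_exact_convert2progression : Prop := ∀ (timesig : Int × Int) (data : List String × List Int), Dom_convert2progression timesig data → Pre_convert2progression timesig data → D_convert2progression timesig data → convert2progression timesig data ≠ convert2progression_alt timesig data

-- ===== LEMMAS AND PROOFS =====

-- 'flatBars bars ++ cur' is the flat progression list A has built when B has built (bars, cur)
def flatBars (bars : List (List String)) : List String := (bars.map (· ++ ["|"])).flatten

-- B's final joining loop, as a function of the bar list
def joinB : List (List String) → List String
  | [] => []
  | bar0 :: rest => rest.foldl (fun out bar => out ++ ["|"] ++ bar) bar0

-- '[1:-1]' in each port's slice form equals the tail/dropLast form D_ is stated in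
lemma slice_one_neg_one {α : Type} (xs : List α) :
    PySem.List.slice xs (some 1) (some (-1)) = xs.tail.dropLast := by
  rcases xs with _ | ⟨a, t⟩
  · rfl
  · simp [PySem.List.slice, PySem.List.clampIdx, List.dropLast_eq_take]
    split_ifs <;> omega

lemma flatBars_concat (bars : List (List String)) (x : List String) :
    flatBars (bars ++ [x]) = flatBars bars ++ x ++ ["|"] := by
  simp [flatBars]

lemma foldl_join (t : List (List String)) (h : List String) :
    t.foldl (fun out bar => out ++ ["|"] ++ bar) h = h ++ (t.map (fun b => "|" :: b)).flatten := by
  induction t generalizing h with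
  | nil => simp
  | cons x t _ => simp [List.foldl_cons]

lemma flatBars_eq_joinB (bars : List (List String)) (hne : bars ≠ []) :
    flatBars bars = joinB bars ++ ["|"] := by
  cases bars with
  | nil => exact absurd rfl hne
  | cons h t =>
    simp only [joinB, foldl_join]
    induction t generalizing h with
    | nil => simp [flatBars]
    | cons x t ih =>
      have hx := ih x
      simp only [flatBars, List.map_cons, List.flatten_cons] at hx ⊢
      simp [hx]

lemma joinB_concat (bars : List (List String)) (x : List String) :
    joinB (bars ++ [x]) = flatBars bars ++ x := by
  cases bars with
  | nil => simp [joinB, flatBars]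
  | cons h t =>
    simp only [List.cons_append, joinB, List.foldl_append, List.foldl_cons, List.foldl_nil]
    rw [flatBars_eq_joinB (h :: t) (by simp), joinB]

-- main invariant: running both loops in parallel over the remaining beats
lemma pvLoop_inv (bnum : Int) (cs : List String) :
    ∀ (bs : List Int) (k : Nat) (cnt : Int) (bars : List (List String)) (cur : List String),
    k + bs.length ≤ cs.length →
    pvLoopA cs bnum bs (k : Int) cnt (flatBars bars ++ cur)
        = (cnt + bs.sum,
           flatBars (pvLoopB bnum ((cs.drop k).zip bs) bars cur cnt).1
             ++ (pvLoopB bnum ((cs.drop k).zip bs) bars cur cnt).2) ∧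
    (bs ≠ [] →
      ((pvLoopB bnum ((cs.drop k).zip bs) bars cur cnt).1 ≠ [] ∨
       (pvLoopB bnum ((cs.drop k).zip bs) bars cur cnt).2 ≠ []) ∧
      ((pvLoopB bnum ((cs.drop k).zip bs) bars cur cnt).2 = [] →
        PySem.Int.mod (cnt + bs.sum) bnum = 0) ∧
      ((pvLoopB bnum ((cs.drop k).zip bs) bars cur cnt).2 ≠ [] →
        PySem.Int.mod (cnt + bs.sum) bnum ≠ 0 ∧
        (pvLoopB bnum ((cs.drop k).zip bs) bars cur cnt).2.getLast? = getElem? cs (k + bs.length - 1))) := by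
  intro bs
  induction bs with
  | nil =>
    intro k cnt bars cur hk
    exact ⟨by simp [pvLoopA, pvLoopB], fun h => absurd rfl h⟩
  | cons b bs ih =>
    intro k cnt bars cur hk
    have hklt : k < cs.length := by simp only [List.length_cons] at hk; omega
    have hdrop : cs.drop k = cs[k] :: cs.drop (k + 1) := List.drop_eq_getElem_cons hklt
    have hget : PySem.List.pyGet? cs (k : Int) = some cs[k] := by
      simp [PySem.List.pyGet?_natCast, List.getElem?_eq_getElem hklt]
    have hstepA : ∀ P : List String, pvLoopA cs bnum (b :: bs) (k : Int) cnt P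
        = pvLoopA cs bnum bs ((k + 1 : Nat) : Int) (cnt + b)
            (if PySem.Int.mod (cnt + b) bnum == 0 then P ++ [cs[k]] ++ ["|"] else P ++ [cs[k]]) := by
      intro P
      simp only [pvLoopA, hget, Option.getD_some]
      norm_cast
    rw [hdrop]
    have hk1 : (k + 1) + bs.length ≤ cs.length := by simp only [List.length_cons] at hk; omega
    by_cases hmod : PySem.Int.mod (cnt + b) bnum = 0
    · -- bar closes
      have hstepB : pvLoopB bnum ((cs[k] :: cs.drop (k + 1)).zip (b :: bs)) bars cur cnt
          = pvLoopB bnum ((cs.drop (k + 1)).zip bs) (bars ++ [cur ++ [cs[k]]]) [] (cnt + b) := by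
        simp only [List.zip_cons_cons, pvLoopB]
        simp [hmod]
      rw [hstepB, hstepA]
      obtain ⟨h1, h2⟩ := ih (k + 1) (cnt + b) (bars ++ [cur ++ [cs[k]]]) [] hk1
      have hP : (flatBars bars ++ cur) ++ [cs[k]] ++ ["|"]
          = flatBars (bars ++ [cur ++ [cs[k]]]) ++ ([] : List String) := by
        simp [flatBars_concat]
      constructor
      · rw [if_pos (by simp [hmod]), hP, h1]
        simp only [List.sum_cons]
        congr 1; ring
      · intro _
        rcases Decidable.em (bs = []) with hbs | hbs
        · subst hbs
          simp only [List.zip_nil_right, pvLoopB]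
          exact ⟨Or.inl (by simp), fun _ => by simpa using hmod, fun h => absurd rfl h⟩
        · obtain ⟨h3, h4, h5⟩ := h2 hbs
          refine ⟨h3, ?_, ?_⟩
          · intro hz
            have := h4 hz
            rw [List.sum_cons, ← add_assoc]
            exact this
          · intro hz
            obtain ⟨ha, hb⟩ := h5 hz
            refine ⟨?_, ?_⟩
            · rw [List.sum_cons, ← add_assoc]; exact ha
            · rw [hb]; congr 1
              simp only [List.length_cons]; omega
    · -- bar stays open
      have hstepB : pvLoopB bnum ((cs[k] :: cs.drop (k + 1)).zip (b :: bs)) bars cur cnt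
          = pvLoopB bnum ((cs.drop (k + 1)).zip bs) bars (cur ++ [cs[k]]) (cnt + b) := by
        simp only [List.zip_cons_cons, pvLoopB]
        simp [hmod]
      rw [hstepB, hstepA]
      obtain ⟨h1, h2⟩ := ih (k + 1) (cnt + b) bars (cur ++ [cs[k]]) hk1
      have hP : (flatBars bars ++ cur) ++ [cs[k]] = flatBars bars ++ (cur ++ [cs[k]]) := by
        simp
      constructor
      · rw [if_neg (by simp [hmod]), hP, h1]
        simp only [List.sum_cons]
        congr 1; ring
      · intro _
        rcases Decidable.em (bs = []) with hbs | hbs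
        · subst hbs
          simp only [List.zip_nil_right, pvLoopB]
          refine ⟨Or.inr (by simp), fun hz => absurd hz (by simp), fun _ => ⟨by simpa using hmod, ?_⟩⟩
          rw [List.getLast?_concat]
          simp [List.getElem?_eq_getElem hklt]
        · obtain ⟨h3, h4, h5⟩ := h2 hbs
          refine ⟨h3, ?_, ?_⟩
          · intro hz
            have := h4 hz
            rw [List.sum_cons, ← add_assoc]
            exact this
          · intro hz
            obtain ⟨ha, hb⟩ := h5 hz
            refine ⟨?_, ?_⟩
            · rw [List.sum_cons, ← add_assoc]; exact ha
            · rw [hb]; congr 1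
              simp only [List.length_cons]; omega

lemma alt_match_eq_joinB (bars : List (List String)) :
    (match bars with
     | [] => ([] : List String)
     | bar0 :: rest => rest.foldl (fun out bar => out ++ ["|"] ++ bar) bar0) = joinB bars := by
  cases bars <;> rfl

-- the two ports, expressed through the parallel loop state
lemma ports_core (ts : Int × Int) (data : List String × List Int)
    (hlen : (PySem.List.slice data.2 (some 1) (some (-1))).length ≤ (PySem.List.slice data.1 (some 1) (some (-1))).length) :
    (convert2progression ts data =
      (if (flatBars (pvLoopB ts.1 ((PySem.List.slice data.1 (some 1) (some (-1))).zip (PySem.List.slice data.2 (some 1) (some (-1)))) [] [] 0).1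
            ++ (pvLoopB ts.1 ((PySem.List.slice data.1 (some 1) (some (-1))).zip (PySem.List.slice data.2 (some 1) (some (-1)))) [] [] 0).2).getLast? == some "|"
       then (flatBars (pvLoopB ts.1 ((PySem.List.slice data.1 (some 1) (some (-1))).zip (PySem.List.slice data.2 (some 1) (some (-1)))) [] [] 0).1
            ++ (pvLoopB ts.1 ((PySem.List.slice data.1 (some 1) (some (-1))).zip (PySem.List.slice data.2 (some 1) (some (-1)))) [] [] 0).2).dropLast
       else flatBars (pvLoopB ts.1 ((PySem.List.slice data.1 (some 1) (some (-1))).zip (PySem.List.slice data.2 (some 1) (some (-1)))) [] [] 0).1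
            ++ (pvLoopB ts.1 ((PySem.List.slice data.1 (some 1) (some (-1))).zip (PySem.List.slice data.2 (some 1) (some (-1)))) [] [] 0).2)) ∧
    (convert2progression_alt ts data =
      joinB (if (pvLoopB ts.1 ((PySem.List.slice data.1 (some 1) (some (-1))).zip (PySem.List.slice data.2 (some 1) (some (-1)))) [] [] 0).2 = []
             then (pvLoopB ts.1 ((PySem.List.slice data.1 (some 1) (some (-1))).zip (PySem.List.slice data.2 (some 1) (some (-1)))) [] [] 0).1
             else (pvLoopB ts.1 ((PySem.List.slice data.1 (some 1) (some (-1))).zip (PySem.List.slice data.2 (some 1) (some (-1)))) [] [] 0).1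
                  ++ [(pvLoopB ts.1 ((PySem.List.slice data.1 (some 1) (some (-1))).zip (PySem.List.slice data.2 (some 1) (some (-1)))) [] [] 0).2])) := by
  have hinv := (pvLoop_inv ts.1 (PySem.List.slice data.1 (some 1) (some (-1)))
      (PySem.List.slice data.2 (some 1) (some (-1))) 0 0 [] [] (by simpa using hlen)).1
  simp only [List.drop_zero, Nat.cast_zero] at hinv
  constructor
  · simp only [convert2progression, PySem.List.pyGet?_neg_one]
    rw [show (flatBars [] ++ ([] : List String)) = [] from rfl] at hinv
    rw [hinv]
  · simp only [convert2progression_alt]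
    rw [← alt_match_eq_joinB]

-- the parallel loop state, named, plus the invariant facts used in the final case split
lemma final_state (ts : Int × Int) (data : List String × List Int)
    (hbne : PySem.List.slice data.2 (some 1) (some (-1)) ≠ ([] : List Int))
    (hlen : (PySem.List.slice data.2 (some 1) (some (-1))).length ≤ (PySem.List.slice data.1 (some 1) (some (-1))).length) :
    ((pvLoopB ts.1 ((PySem.List.slice data.1 (some 1) (some (-1))).zip (PySem.List.slice data.2 (some 1) (some (-1)))) [] [] 0).1 ≠ [] ∨
     (pvLoopB ts.1 ((PySem.List.slice data.1 (some 1) (some (-1))).zip (PySem.List.slice data.2 (some 1) (some (-1)))) [] [] 0).2 ≠ []) ∧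
    ((pvLoopB ts.1 ((PySem.List.slice data.1 (some 1) (some (-1))).zip (PySem.List.slice data.2 (some 1) (some (-1)))) [] [] 0).2 = [] →
      PySem.Int.mod (PySem.List.slice data.2 (some 1) (some (-1))).sum ts.1 = 0) ∧
    ((pvLoopB ts.1 ((PySem.List.slice data.1 (some 1) (some (-1))).zip (PySem.List.slice data.2 (some 1) (some (-1)))) [] [] 0).2 ≠ [] →
      PySem.Int.mod (PySem.List.slice data.2 (some 1) (some (-1))).sum ts.1 ≠ 0 ∧
      (pvLoopB ts.1 ((PySem.List.slice data.1 (some 1) (some (-1))).zip (PySem.List.slice data.2 (some 1) (some (-1)))) [] [] 0).2.getLast?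
        = getElem? (PySem.List.slice data.1 (some 1) (some (-1))) ((PySem.List.slice data.2 (some 1) (some (-1))).length - 1)) := by
  have hinv := (pvLoop_inv ts.1 (PySem.List.slice data.1 (some 1) (some (-1)))
      (PySem.List.slice data.2 (some 1) (some (-1))) 0 0 [] [] (by simpa using hlen)).2 hbne
  simpa only [List.drop_zero, Nat.cast_zero, zero_add, Nat.zero_add] using hinv

theorem convert2progression_spec : Claim_unchanged_convert2progression := by
  intro ts data _ hpre hnD
  obtain ⟨hb0, hbne, hlen⟩ := hpre
  obtain ⟨hA, hB⟩ := ports_core ts data hlen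
  obtain ⟨hor, hclose, hopen⟩ := final_state ts data hbne hlen
  rw [hA, hB]
  by_cases hz : (pvLoopB ts.1 ((PySem.List.slice data.1 (some 1) (some (-1))).zip (PySem.List.slice data.2 (some 1) (some (-1)))) [] [] 0).2 = []
  · have h1 := hor.resolve_right (by simp [hz])
    rw [hz, if_pos, if_pos rfl]
    · rw [List.append_nil, flatBars_eq_joinB _ h1, List.dropLast_concat]
    · rw [List.append_nil, flatBars_eq_joinB _ h1, List.getLast?_concat]
      simp
  · obtain ⟨hm, hlast⟩ := hopen hz
    have hS1 := slice_one_neg_one (α := String) data.1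
    have hS2 := slice_one_neg_one (α := Int) data.2
    have hpipe : getElem? (PySem.List.slice data.1 (some 1) (some (-1)))
        ((PySem.List.slice data.2 (some 1) (some (-1))).length - 1) ≠ some "|" := by
      intro hcon
      apply hnD
      refine ⟨by rw [← hS2]; exact hbne, by rw [← hS1, ← hS2]; exact hlen,
        fun hdvd => hm ?_, by rw [← hS1, ← hS2]; exact hcon⟩
      rw [hS2]
      exact (PySem.Int.mod_eq_zero_iff_dvd _ _).mpr hdvd
    rw [if_neg hz, if_neg, joinB_concat]
    rw [List.getLast?_append_of_ne_nil _ hz, hlast]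
    simpa using hpipe

theorem convert2progression_tight : Claim_exact_convert2progression := by
  intro ts data _ hpre hD
  obtain ⟨hb0, hbne, hlen⟩ := hpre
  obtain ⟨hbne', hlen', hm, hpipe⟩ := hD
  have hS1 := slice_one_neg_one (α := String) data.1
  have hS2 := slice_one_neg_one (α := Int) data.2
  rw [← hS1, ← hS2] at hpipe
  obtain ⟨hA, hB⟩ := ports_core ts data hlen
  obtain ⟨hor, hclose, hopen⟩ := final_state ts data hbne hlen
  have hz : (pvLoopB ts.1 ((PySem.List.slice data.1 (some 1) (some (-1))).zip (PySem.List.slice data.2 (some 1) (some (-1)))) [] [] 0).2 ≠ [] := by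
    intro h
    apply hm
    rw [← hS2]
    exact (PySem.Int.mod_eq_zero_iff_dvd _ _).mp (hclose h)
  obtain ⟨_, hlast⟩ := hopen hz
  rw [hA, hB, if_neg hz, joinB_concat, if_pos]
  · intro hcon
    have := congrArg List.length hcon
    have hne : flatBars (pvLoopB ts.1 ((PySem.List.slice data.1 (some 1) (some (-1))).zip (PySem.List.slice data.2 (some 1) (some (-1)))) [] [] 0).1
        ++ (pvLoopB ts.1 ((PySem.List.slice data.1 (some 1) (some (-1))).zip (PySem.List.slice data.2 (some 1) (some (-1)))) [] [] 0).2 ≠ [] := by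
      simp [hz]
    rw [List.length_dropLast] at this
    have hpos : 0 < (flatBars (pvLoopB ts.1 ((PySem.List.slice data.1 (some 1) (some (-1))).zip (PySem.List.slice data.2 (some 1) (some (-1)))) [] [] 0).1
        ++ (pvLoopB ts.1 ((PySem.List.slice data.1 (some 1) (some (-1))).zip (PySem.List.slice data.2 (some 1) (some (-1)))) [] [] 0).2).length :=
      List.length_pos_of_ne_nil hne
    omega
  · rw [List.getLast?_append_of_ne_nil _ hz, hlast, hpipe]
    simp

-- ===== VERDICT (by name: the statement is the Claim_ definition above) =====
theorem convert2progression_changed : Claim_changed_convert2progression := by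
  unfold Claim_changed_convert2progression; decide
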